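-- pv_equiv track=rewrite | github.com/erenbg1/payroll-dashboard | backend/extraction.py | _extract_name_from_lines
-- ===== SOURCE A (Python) =====
-- SKIP_KEYWORDS = ["Mehrfachbeschäftigung", "Midijob", "Elterneigenschaft", "Krankenkasse", "Personalgruppe", "Geringfügig"]
--
-- def _extract_name_from_lines(lines):
--     """Extract employee name by scanning for salutation then looking ahead."""
--     for j, line in enumerate(lines):
--         if line.strip() in ["Herr", "Frau", "Herrn"]:
--             for k in range(1, 5):
--                 if j + k < len(lines):
--                     candidate = lines[j + k].strip()
--                     if not candidate:
--                         continue
--                     if any(kw in candidate for kw in SKIP_KEYWORDS):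
--                         continue
--                     return candidate
--     return "Unknown"
-- ===== SOURCE B (Python) =====
-- SKIP_KEYWORDS = ["Mehrfachbeschäftigung", "Midijob", "Elterneigenschaft", "Krankenkasse", "Personalgruppe", "Geringfügig"]
--
-- def _extract_name_from_lines(lines):
--     """Single pass with a lookahead countdown instead of a nested index scan."""
--     countdown = 0
--     for line in lines:
--         candidate = line.strip()
--         if countdown > 0:
--             if candidate and not any(kw in candidate for kw in SKIP_KEYWORDS):
--                 return candidate
--             countdown -= 1
--         if candidate in ("Herr", "Frau", "Herrn"):
--             countdown = 4
--     return "Unknown"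
-- ===== Notes on version B (the rewrite author's own statement) =====
-- stated objective: simpler
-- what changed: Replaced A's nested scan (find a salutation line, then re-index lines[j+k] for a 4-line lookahead) by a single left-to-right pass that keeps an integer countdown of remaining lookahead slots, checking the candidate-return before resetting the countdown on a salutation.
import Mathlib
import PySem

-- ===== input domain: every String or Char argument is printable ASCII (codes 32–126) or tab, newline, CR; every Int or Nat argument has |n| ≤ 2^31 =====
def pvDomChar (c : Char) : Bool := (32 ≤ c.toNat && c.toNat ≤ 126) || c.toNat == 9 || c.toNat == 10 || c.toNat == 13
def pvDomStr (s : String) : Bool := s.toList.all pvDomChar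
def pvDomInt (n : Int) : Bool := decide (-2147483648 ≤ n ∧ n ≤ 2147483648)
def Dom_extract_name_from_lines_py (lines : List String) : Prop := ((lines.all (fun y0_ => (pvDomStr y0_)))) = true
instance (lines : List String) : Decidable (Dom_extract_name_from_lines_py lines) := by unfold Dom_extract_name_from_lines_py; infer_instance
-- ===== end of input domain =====

-- B replaces A's nested salutation-then-lookahead index scan by a single pass that keeps an
-- integer countdown of remaining lookahead slots (objective: simpler, same O(n) cost).

def pvSkip : List String := ["Mehrfachbeschäftigung", "Midijob", "Elterneigenschaft", "Krankenkasse", "Personalgruppe", "Geringfügig"]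

-- ===== PORT A =====
-- one iteration of A's inner 'for k in range(1, 5)' body
def aStep (lines : List String) (j : Nat) (k : Int) : Option String :=
  if (j : Int) + k < lines.length then
    match PySem.List.pyGet? lines ((j : Int) + k) with
    | some line =>
      let candidate := PySem.Str.strip line
      if candidate = "" then none
      else if pvSkip.any (fun kw => PySem.Str.isIn kw candidate) then none
      else some candidate
    | none => none
  else none

-- A's inner loop, early-return encoded with Option
def aInner (lines : List String) (j : Nat) : Option String :=
  (PySem.List.pyRange 1 5 1).foldl
    (fun acc k => match acc with | some c => some c | none => aStep lines j k) none

-- A's outer 'for j, line in enumerate(lines)'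
def aLoop (lines : List String) (j : Nat) : List String → String
  | [] => "Unknown"
  | line :: rest =>
    if (["Herr", "Frau", "Herrn"] : List String).contains (PySem.Str.strip line) then
      match aInner lines j with
      | some c => c
      | none => aLoop lines (j + 1) rest
    else aLoop lines (j + 1) rest

def extract_name_from_lines_py (lines : List String) : String := aLoop lines 0 lines

-- ===== PORT B =====
-- 'candidate and not any(kw in candidate for kw in SKIP_KEYWORDS)'
def pvGood (c : String) : Bool := (c != "") && !(pvSkip.any (fun kw => PySem.Str.isIn kw c))

-- 'candidate in ("Herr", "Frau", "Herrn")'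
def pvSal (c : String) : Bool := c == "Herr" || c == "Frau" || c == "Herrn"

def bLoop : List String → Nat → String
  | [], _ => "Unknown"
  | line :: rest, countdown =>
    let candidate := PySem.Str.strip line
    if 0 < countdown then
      if pvGood candidate then candidate
      else bLoop rest (if pvSal candidate then 4 else countdown - 1)
    else bLoop rest (if pvSal candidate then 4 else countdown)

def extract_name_from_lines_py_alt (lines : List String) : String := bLoop lines 0

-- ===== PRECONDITION & SPEC =====
def Spec_extract_name_from_lines_py (lines : List String) (out : String) : Prop := out = extract_name_from_lines_py_alt lines
instance (lines : List String) (out : String) : Decidable (Spec_extract_name_from_lines_py lines out) := by unfold Spec_extract_name_from_lines_py; infer_instance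

-- ===== CLAIM (what is proved, stated in full; the proofs are below) =====
def Claim_equal_extract_name_from_lines_py : Prop := ∀ (lines : List String), Dom_extract_name_from_lines_py lines → Spec_extract_name_from_lines_py lines (extract_name_from_lines_py lines)

-- ===== LEMMAS AND PROOFS =====

-- first acceptable candidate among the first n lines (A's inner-loop result, suffix view)
def firstGoodN : Nat → List String → Option String
  | 0, _ => none
  | _ + 1, [] => none
  | n + 1, line :: rest =>
    let c := PySem.Str.strip line
    if pvGood c then some c else firstGoodN n rest

-- A's outer loop rephrased on the suffix at the current position
def aSuffix : List String → String
  | [] => "Unknown"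
  | line :: rest =>
    if pvSal (PySem.Str.strip line) then
      match firstGoodN 4 rest with
      | some c => c
      | none => aSuffix rest
    else aSuffix rest

theorem good_of_sal (c : String) (h : pvSal c = true) : pvGood c = true := by
  have h' : (c = "Herr" ∨ c = "Frau") ∨ c = "Herrn" := by simpa [pvSal] using h
  rcases h' with (rfl | rfl) | rfl <;> decide

theorem good_branch (line : String) :
    (if PySem.Str.strip line = "" then (none : Option String)
     else if pvSkip.any (fun kw => PySem.Str.isIn kw (PySem.Str.strip line)) then none
     else some (PySem.Str.strip line)) =
    (if pvGood (PySem.Str.strip line) then some (PySem.Str.strip line) else none) := by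
  simp only [pvGood, Bool.and_eq_true, bne_iff_ne, ne_eq, Bool.not_eq_true']
  split_ifs <;> simp_all
  rename_i hex hall
  obtain ⟨x, hx, hxt⟩ := hex
  have := hall.2 x hx
  simp [this] at hxt

theorem not_sal_of_not_good (c : String) (h : pvGood c = false) : pvSal c = false := by
  by_contra hne
  have := good_of_sal c (by revert hne; cases pvSal c <;> simp)
  simp [this] at h

theorem aStep_eq (lines : List String) (j : Nat) (k : Nat) (hk : 0 < k) :
    aStep lines j (k : Int) =
      match (lines.drop (j + 1))[k - 1]? with
      | some line =>
        let c := PySem.Str.strip line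
        if pvGood c then some c else none
      | none => none := by
  have hcast : (j : Int) + (k : Int) = ((j + k : Nat) : Int) := by push_cast; ring
  have hget : (lines.drop (j + 1))[k - 1]? = lines[j + 1 + (k - 1)]? := by
    rw [List.getElem?_drop]
  have hidx : j + 1 + (k - 1) = j + k := by omega
  rw [hget, hidx]
  unfold aStep
  rw [hcast, PySem.List.pyGet?_natCast]
  by_cases h : j + k < lines.length
  · have h' : ((j + k : Nat) : Int) < (lines.length : Int) := by exact_mod_cast h
    rw [if_pos h', List.getElem?_eq_getElem h]
    exact good_branch lines[j + k]
  · have h' : ¬ ((j + k : Nat) : Int) < (lines.length : Int) := by exact_mod_cast h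
    rw [if_neg h', List.getElem?_eq_none (by omega)]

theorem aInner_eq (lines : List String) (j : Nat) :
    aInner lines j = firstGoodN 4 (lines.drop (j + 1)) := by
  have hr : PySem.List.pyRange 1 5 1 = [1, 2, 3, 4] := by decide
  unfold aInner
  rw [hr]
  simp only [List.foldl]
  have e1 := aStep_eq lines j 1 (by omega)
  have e2 := aStep_eq lines j 2 (by omega)
  have e3 := aStep_eq lines j 3 (by omega)
  have e4 := aStep_eq lines j 4 (by omega)
  norm_num [-List.getElem?_drop] at e1 e2 e3 e4
  rw [e1, e2, e3, e4]
  rcases hd : lines.drop (j + 1) with _ | ⟨a, _ | ⟨b, _ | ⟨c, _ | ⟨e, tail⟩⟩⟩⟩ <;>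
    simp only [firstGoodN, List.getElem?_cons_zero, List.getElem?_cons_succ,
      List.getElem?_nil] <;>
    split_ifs <;> simp_all

set_option maxRecDepth 4000 in
theorem aLoop_eq (lines : List String) : ∀ (rest : List String) (j : Nat),
    rest = lines.drop j → aLoop lines j rest = aSuffix rest := by
  intro rest
  induction rest with
  | nil => intro j _; rfl
  | cons line rest ih =>
    intro j hj
    have hrest : rest = lines.drop (j + 1) := by
      have : lines.drop (j + 1) = (lines.drop j).drop 1 := by
        rw [List.drop_drop]
      rw [this, ← hj]; rfl
    have hsal : (["Herr", "Frau", "Herrn"] : List String).contains (PySem.Str.strip line)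
        = pvSal (PySem.Str.strip line) := by
      simp only [pvSal, List.contains_cons, List.contains_nil, beq_eq_decide, Bool.or_false]
      rw [Bool.or_assoc]
    rw [show aLoop lines j (line :: rest) =
        (if (["Herr", "Frau", "Herrn"] : List String).contains (PySem.Str.strip line) then
          match aInner lines j with
          | some c => c
          | none => aLoop lines (j + 1) rest
        else aLoop lines (j + 1) rest) from rfl]
    rw [hsal, aInner_eq, ← hrest, ih (j + 1) hrest]
    by_cases h : pvSal (PySem.Str.strip line) = true
    · simp only [aSuffix, h, if_true]
    · have h' : pvSal (PySem.Str.strip line) = false := by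
        revert h; cases pvSal (PySem.Str.strip line) <;> simp
      simp only [aSuffix, h', Bool.false_eq_true, if_false]

theorem aSuffix_drop_of_bad : ∀ (m : Nat) (rest : List String),
    firstGoodN m rest = none → aSuffix rest = aSuffix (rest.drop m) := by
  intro m
  induction m with
  | zero => intro rest _; rfl
  | succ m ih =>
    intro rest h
    cases rest with
    | nil => simp
    | cons line rest =>
      have hbad : pvGood (PySem.Str.strip line) = false := by
        by_contra hb
        have : pvGood (PySem.Str.strip line) = true := by
          revert hb; cases pvGood (PySem.Str.strip line) <;> simp
        simp [firstGoodN, this] at h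
      have hrec : firstGoodN m rest = none := by
        simpa [firstGoodN, hbad] using h
      have hns := not_sal_of_not_good _ hbad
      simp only [aSuffix, hns, Bool.false_eq_true, if_false, List.drop_succ_cons]
      exact ih rest hrec

theorem main_lemma : ∀ (n : Nat) (rest : List String), rest.length ≤ n →
    (bLoop rest 0 = aSuffix rest) ∧
    (∀ cd : Nat, 0 < cd →
      bLoop rest cd = (match firstGoodN cd rest with
        | some c => c
        | none => aSuffix (rest.drop cd))) := by
  intro n
  induction n with
  | zero =>
    intro rest hlen
    have : rest = [] := by
      cases rest with
      | nil => rfl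
      | cons a b => simp at hlen
    subst this
    refine ⟨rfl, ?_⟩
    intro cd hcd
    cases cd with
    | zero => omega
    | succ m => rfl
  | succ n ih =>
    intro rest hlen
    cases rest with
    | nil =>
      refine ⟨rfl, ?_⟩
      intro cd hcd
      cases cd with
      | zero => omega
      | succ m => rfl
    | cons line rest =>
      have hlen' : rest.length ≤ n := by simpa using hlen
      obtain ⟨ih1, ih2⟩ := ih rest hlen'
      constructor
      · -- bLoop (line :: rest) 0 = aSuffix (line :: rest)
        simp only [bLoop, aSuffix, if_neg (by omega : ¬ (0 : Nat) < 0)]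
        by_cases hs : pvSal (PySem.Str.strip line) = true
        · simp only [hs, if_pos]
          rw [ih2 4 (by omega)]
          cases hfg : firstGoodN 4 rest with
          | some c => simp
          | none => simp [aSuffix_drop_of_bad 4 rest hfg]
        · have hs' : pvSal (PySem.Str.strip line) = false := by
            revert hs; cases pvSal (PySem.Str.strip line) <;> simp
          simp [hs', ih1]
      · intro cd hcd
        cases cd with
        | zero => omega
        | succ m =>
          simp only [bLoop, if_pos (by omega : 0 < m + 1)]
          by_cases hg : pvGood (PySem.Str.strip line) = true
          · simp [firstGoodN, hg]
          · have hg' : pvGood (PySem.Str.strip line) = false := by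
              revert hg; cases pvGood (PySem.Str.strip line) <;> simp
            have hns := not_sal_of_not_good _ hg'
            simp only [hg', hns, Bool.false_eq_true, if_false, Nat.add_sub_cancel]
            cases m with
            | zero => simpa [firstGoodN, hg'] using ih1
            | succ m' =>
              rw [ih2 (m' + 1) (by omega)]
              simp [firstGoodN, hg']

-- ===== VERDICT (by name: the statement is the Claim_ definition above) =====
theorem extract_name_from_lines_py_spec : Claim_equal_extract_name_from_lines_py := by
  intro lines _
  unfold Spec_extract_name_from_lines_py extract_name_from_lines_py extract_name_from_lines_py_alt
  rw [aLoop_eq lines lines 0 (by simp), (main_lemma lines.length lines le_rfl).1]
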